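-- pv_equiv track=rewrite | github.com/wathoresanket/campaignx | backend/engines/content_engine.py | _get_eligible_benefits
-- ===== SOURCE A (Python) =====
-- from typing import Dict, Any, List
--
-- def _get_eligible_benefits(segment_name: str, conditional_benefits: List[str]) -> tuple:
--     """Pre-filter conditional benefits into eligible and ineligible for this segment."""
--     name_lower = segment_name.lower()
--     demographic_map = {
--         "senior": ["senior", "citizen", "elderly", "retired", "60+"],
--         "female": ["female", "woman", "women", "lady", "ladies"],
--         "male": ["male", "man", "men", "gentleman", "gentlemen"],
--         "youth": ["youth", "student", "young", "college", "under-25", "teen"],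
--         "professional": ["professional", "salaried", "corporate", "working"],
--         "inactive": ["inactive", "dormant", "re-activate"]
--     }
--
--     eligible = []
--     ineligible = []
--     for benefit in conditional_benefits:
--         benefit_lower = benefit.lower()
--
--         # Find which demographic GROUPS are REQUIRED by this benefit
--         required_groups = []
--         for group, keywords in demographic_map.items():
--             if any(kw in benefit_lower for kw in keywords):
--                 required_groups.append(group)
--
--         if not required_groups:
--             # If no specific demographic mentioned, it shouldn't really be a conditional benefit,
--             # but we'll treat it as eligible to be safe.
--             eligible.append(benefit)
--             continue
--
--         # Segment MUST satisfy ALL mentioned groups in the benefit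
--         is_match = True
--         for group in required_groups:
--             keywords = demographic_map[group]
--             if not any(kw in name_lower for kw in keywords):
--                 is_match = False
--                 break
--
--         if is_match:
--             eligible.append(benefit)
--         else:
--             ineligible.append(benefit)
--
--     return eligible, ineligible
-- ===== SOURCE B (Python) =====
-- def _get_eligible_benefits(segment_name, conditional_benefits):
--     """Pre-filter conditional benefits into eligible and ineligible for this segment."""
--     name_lower = segment_name.lower()
--     demographic_map = {
--         "senior": ["senior", "citizen", "elderly", "retired", "60+"],
--         "female": ["female", "woman", "women", "lady", "ladies"],
--         "male": ["male", "man", "men", "gentleman", "gentlemen"],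
--         "youth": ["youth", "student", "young", "college", "under-25", "teen"],
--         "professional": ["professional", "salaried", "corporate", "working"],
--         "inactive": ["inactive", "dormant", "re-activate"]
--     }
--     # Compute once the demographic groups the segment itself belongs to.
--     segment_groups = [g for g, kws in demographic_map.items()
--                       if any(kw in name_lower for kw in kws)]
--
--     def is_eligible(benefit):
--         benefit_lower = benefit.lower()
--         # every group the benefit mentions must be among the segment's groups
--         # (vacuously true when the benefit mentions no demographic)
--         return all(g in segment_groups
--                    for g, kws in demographic_map.items()
--                    if any(kw in benefit_lower for kw in kws))
--
--     eligible = [b for b in conditional_benefits if is_eligible(b)]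
--     ineligible = [b for b in conditional_benefits if not is_eligible(b)]
--     return eligible, ineligible
-- ===== Notes on version B (the rewrite author's own statement) =====
-- stated objective: simpler
-- what changed: Hoists the segment's demographic groups out of the benefit loop (computed once), replaces the per-benefit required-group list plus dict-lookup re-scan of the segment name with a membership/subset test against that precomputed list, and builds eligible/ineligible as two comprehensions instead of a branching accumulator loop; the no-demographic case falls out of the vacuous all().
import Mathlib
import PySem

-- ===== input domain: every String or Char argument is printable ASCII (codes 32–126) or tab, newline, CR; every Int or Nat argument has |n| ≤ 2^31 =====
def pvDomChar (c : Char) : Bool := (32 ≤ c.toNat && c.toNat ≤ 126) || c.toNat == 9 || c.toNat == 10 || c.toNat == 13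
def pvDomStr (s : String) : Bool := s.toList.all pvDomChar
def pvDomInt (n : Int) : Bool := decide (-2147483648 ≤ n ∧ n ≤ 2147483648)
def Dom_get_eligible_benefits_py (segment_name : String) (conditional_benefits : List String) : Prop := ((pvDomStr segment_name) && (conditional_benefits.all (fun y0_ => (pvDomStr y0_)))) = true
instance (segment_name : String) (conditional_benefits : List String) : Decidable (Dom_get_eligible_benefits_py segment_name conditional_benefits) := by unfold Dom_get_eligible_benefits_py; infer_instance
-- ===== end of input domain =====

-- B hoists the segment's demographic groups out of the benefit loop and classifies each
-- benefit by a membership test against that precomputed list, building the two output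
-- lists as two filters instead of a branching accumulator loop (objective: simpler).

-- ===== PORT A =====
-- the demographic_map dict literal (distinct keys, insertion order)
def pvDemoMap : List (String × List String) :=
  [("senior", ["senior", "citizen", "elderly", "retired", "60+"]),
   ("female", ["female", "woman", "women", "lady", "ladies"]),
   ("male", ["male", "man", "men", "gentleman", "gentlemen"]),
   ("youth", ["youth", "student", "young", "college", "under-25", "teen"]),
   ("professional", ["professional", "salaried", "corporate", "working"]),
   ("inactive", ["inactive", "dormant", "re-activate"])]

def pvDemoDict : PySem.Dict String (List String) := PySem.Dict.ofList pvDemoMap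

def get_eligible_benefits_py (segment_name : String) (conditional_benefits : List String) : List String × List String :=
  let name_lower := PySem.Str.lower segment_name
  conditional_benefits.foldl (fun acc benefit =>
    let benefit_lower := PySem.Str.lower benefit
    -- for group, keywords in demographic_map.items(): collect required_groups
    let required_groups := pvDemoDict.items.foldl (fun rg p =>
      if p.2.any (fun kw => PySem.Str.isIn kw benefit_lower) then rg ++ [p.1] else rg) []
    if required_groups.isEmpty then (acc.1 ++ [benefit], acc.2)
    else
      -- for group in required_groups: break on first non-match (all short-circuits likewise)
      let is_match := required_groups.all (fun g =>
        (pvDemoDict.getD g []).any (fun kw => PySem.Str.isIn kw name_lower))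
      if is_match then (acc.1 ++ [benefit], acc.2) else (acc.1, acc.2 ++ [benefit]))
    ([], [])

-- ===== PORT B =====
def get_eligible_benefits_py_alt (segment_name : String) (conditional_benefits : List String) : List String × List String :=
  let name_lower := PySem.Str.lower segment_name
  let segment_groups := (pvDemoDict.items.filter
      (fun p => p.2.any (fun kw => PySem.Str.isIn kw name_lower))).map Prod.fst
  let is_eligible := fun (benefit : String) =>
    let benefit_lower := PySem.Str.lower benefit
    (pvDemoDict.items.filter
        (fun p => p.2.any (fun kw => PySem.Str.isIn kw benefit_lower))).all
      (fun p => segment_groups.contains p.1)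
  (conditional_benefits.filter is_eligible,
   conditional_benefits.filter (fun b => !is_eligible b))

-- ===== PRECONDITION & SPEC =====
def Spec_get_eligible_benefits_py (segment_name : String) (conditional_benefits : List String) (out : List String × List String) : Prop := out = get_eligible_benefits_py_alt segment_name conditional_benefits
instance (segment_name : String) (conditional_benefits : List String) (out : List String × List String) : Decidable (Spec_get_eligible_benefits_py segment_name conditional_benefits out) := by unfold Spec_get_eligible_benefits_py; infer_instance

-- ===== CLAIM (what is proved, stated in full; the proofs are below) =====
def Claim_equal_get_eligible_benefits_py : Prop := ∀ (segment_name : String) (conditional_benefits : List String), Dom_get_eligible_benefits_py segment_name conditional_benefits → Spec_get_eligible_benefits_py segment_name conditional_benefits (get_eligible_benefits_py segment_name conditional_benefits)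

-- ===== LEMMAS AND PROOFS =====

-- A's per-benefit eligibility decision (nl = lowered segment name)
def pvDecA (nl b : String) : Bool :=
  if (pvDemoDict.items.foldl (fun rg p =>
        if p.2.any (fun kw => PySem.Str.isIn kw (PySem.Str.lower b)) then rg ++ [p.1] else rg) []).isEmpty
  then true
  else (pvDemoDict.items.foldl (fun rg p =>
        if p.2.any (fun kw => PySem.Str.isIn kw (PySem.Str.lower b)) then rg ++ [p.1] else rg) []).all
      (fun g => (pvDemoDict.getD g []).any (fun kw => PySem.Str.isIn kw nl))

lemma pvItems_eq : pvDemoDict.items = pvDemoMap := by decide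

lemma pvGetD_eq (p : String × List String) (hp : p ∈ pvDemoMap) :
    pvDemoDict.getD p.1 [] = p.2 := by
  fin_cases hp <;> rfl

lemma pvKeysNodup : (pvDemoMap.map Prod.fst).Nodup := by decide

-- on a list with distinct first components, membership of p.1 in the filtered key list is q p
lemma contains_fst_filter {α β : Type} [DecidableEq α] (l : List (α × β)) (q : α × β → Bool)
    (hnd : (l.map Prod.fst).Nodup) (p : α × β) (hp : p ∈ l) :
    (((l.filter q).map Prod.fst).contains p.1) = q p := by
  induction l with
  | nil => cases hp
  | cons x xs ih =>
    simp only [List.map_cons, List.nodup_cons] at hnd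
    rcases List.mem_cons.mp hp with rfl | hmem
    · have hnot : ¬ p.1 ∈ (xs.filter q).map Prod.fst := by
        intro h
        rcases List.mem_map.mp h with ⟨a, ha, hfa⟩
        exact hnd.1 (hfa ▸ List.mem_map_of_mem (List.mem_of_mem_filter ha))
      cases hq : q p <;>
        simp [hq, List.contains_eq_mem, hnot]
    · have hne : x.1 ≠ p.1 := by
        intro h
        exact hnd.1 (h ▸ List.mem_map_of_mem hmem)
      have hrec := ih hnd.2 hmem
      cases hq : q x <;>
        simp_all [List.contains_eq_mem, hne.symm]

-- pointwise-on-members congruence for List.all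
lemma all_congr_mem {α : Type} (l : List α) (p q : α → Bool) (h : ∀ x ∈ l, p x = q x) :
    l.all p = l.all q := by
  induction l with
  | nil => rfl
  | cons x xs ih =>
    simp only [List.all_cons, h x List.mem_cons_self, ih (fun y hy => h y (List.mem_cons_of_mem x hy))]

-- A's decision equals B's is_eligible predicate
lemma dec_eq (nl b : String) :
    pvDecA nl b =
      ((pvDemoDict.items.filter
          (fun p => p.2.any (fun kw => PySem.Str.isIn kw (PySem.Str.lower b)))).all
        (fun p => (((pvDemoDict.items.filter
            (fun p => p.2.any (fun kw => PySem.Str.isIn kw nl))).map Prod.fst).contains p.1))) := by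
  unfold pvDecA
  rw [pvItems_eq,
      PySem.List.foldl_append_if
        (fun p => p.2.any (fun kw => PySem.Str.isIn kw (PySem.Str.lower b))) Prod.fst pvDemoMap []]
  simp only [List.nil_append]
  by_cases hemp : (pvDemoMap.filter
      (fun p => p.2.any (fun kw => PySem.Str.isIn kw (PySem.Str.lower b)))) = []
  · rw [hemp]; rfl
  · have h1 : ((pvDemoMap.filter
        (fun p => p.2.any (fun kw => PySem.Str.isIn kw (PySem.Str.lower b)))).map Prod.fst).isEmpty = false := by
      cases h : ((pvDemoMap.filter
          (fun p => p.2.any (fun kw => PySem.Str.isIn kw (PySem.Str.lower b)))).map Prod.fst).isEmpty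
      · rfl
      · exact absurd (List.map_eq_nil_iff.mp (List.isEmpty_iff.mp h)) hemp
    simp only [h1, Bool.false_eq_true, if_false, List.all_map]
    apply all_congr_mem
    intro p hp
    have hmem : p ∈ pvDemoMap := List.mem_of_mem_filter hp
    simp only [Function.comp_apply]
    rw [pvGetD_eq p hmem,
        contains_fst_filter pvDemoMap (fun p => p.2.any (fun kw => PySem.Str.isIn kw nl))
          pvKeysNodup p hmem]

-- the accumulator loop is two filters
lemma loopA (nl : String) (bs : List String) (e i : List String) :
    bs.foldl (fun acc benefit =>
      let benefit_lower := PySem.Str.lower benefit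
      let required_groups := pvDemoDict.items.foldl (fun rg p =>
        if p.2.any (fun kw => PySem.Str.isIn kw benefit_lower) then rg ++ [p.1] else rg) []
      if required_groups.isEmpty then (acc.1 ++ [benefit], acc.2)
      else
        let is_match := required_groups.all (fun g =>
          (pvDemoDict.getD g []).any (fun kw => PySem.Str.isIn kw nl))
        if is_match then (acc.1 ++ [benefit], acc.2) else (acc.1, acc.2 ++ [benefit])) (e, i)
    = (e ++ bs.filter (fun b => pvDecA nl b),
       i ++ bs.filter (fun b => !pvDecA nl b)) := by
  induction bs generalizing e i with
  | nil => simp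
  | cons b bs ih =>
    simp only [List.foldl_cons, List.filter_cons]
    by_cases hemp : (pvDemoDict.items.foldl (fun rg p =>
        if p.2.any (fun kw => PySem.Str.isIn kw (PySem.Str.lower b)) then rg ++ [p.1] else rg) []).isEmpty = true
    · have hdec : pvDecA nl b = true := by
        unfold pvDecA; simp only [hemp, if_true]
      simp only [hemp, if_true, hdec, ih]
      simp
    · have hemp' : (pvDemoDict.items.foldl (fun rg p =>
          if p.2.any (fun kw => PySem.Str.isIn kw (PySem.Str.lower b)) then rg ++ [p.1] else rg) []).isEmpty = false := by
        simpa using hemp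
      have hdec : pvDecA nl b = (pvDemoDict.items.foldl (fun rg p =>
            if p.2.any (fun kw => PySem.Str.isIn kw (PySem.Str.lower b)) then rg ++ [p.1] else rg) []).all
          (fun g => (pvDemoDict.getD g []).any (fun kw => PySem.Str.isIn kw nl)) := by
        unfold pvDecA; simp only [hemp', Bool.false_eq_true, if_false]
      simp only [hemp', Bool.false_eq_true, if_false]
      cases hall : (pvDemoDict.items.foldl (fun rg p =>
          if p.2.any (fun kw => PySem.Str.isIn kw (PySem.Str.lower b)) then rg ++ [p.1] else rg) []).all
          (fun g => (pvDemoDict.getD g []).any (fun kw => PySem.Str.isIn kw nl)) <;>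
        simp only [hall, if_true, Bool.false_eq_true, if_false, ih, hdec] <;>
        simp

-- ===== VERDICT (by name: the statement is the Claim_ definition above) =====
theorem get_eligible_benefits_py_spec : Claim_equal_get_eligible_benefits_py := by
  intro segment_name conditional_benefits _
  unfold Spec_get_eligible_benefits_py get_eligible_benefits_py get_eligible_benefits_py_alt
  rw [loopA (PySem.Str.lower segment_name) conditional_benefits [] []]
  simp only [List.nil_append]
  refine Prod.ext ?_ ?_ <;>
  · apply List.filter_congr
    intro b _
    simp only [dec_eq (PySem.Str.lower segment_name) b]
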